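-- pv_equiv track=rewrite | github.com/ColinKennedy/Migaku-Dictionary-Addon | src/dictdb.py | _getQueryCriteria
-- ===== SOURCE A (Python) =====
-- import typing
--
-- def _getQueryCriteria(
--     col: str, terms: typing.Sequence[str], op: str = "LIKE"
-- ) -> str:
--
--     toQuery = ""
--     for idx, _ in enumerate(terms):
--         if idx == 0:
--             toQuery += " " + col + " " + op + " ? "
--         else:
--             toQuery += " OR " + col + " " + op + " ? "
--     return toQuery
-- ===== SOURCE B (Python) =====
-- def _getQueryCriteria(col, terms, op="LIKE"):
--     clause = " " + col + " " + op + " ? "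
--     return " OR".join([clause] * len(terms))
-- ===== Notes on version B (the rewrite author's own statement) =====
-- stated objective: idiomatic
-- what changed: Replaces the indexed loop with its idx==0 branch by building one clause string and joining len(terms) copies of it with the separator " OR" (str.join over a replicated list).
import Mathlib
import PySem

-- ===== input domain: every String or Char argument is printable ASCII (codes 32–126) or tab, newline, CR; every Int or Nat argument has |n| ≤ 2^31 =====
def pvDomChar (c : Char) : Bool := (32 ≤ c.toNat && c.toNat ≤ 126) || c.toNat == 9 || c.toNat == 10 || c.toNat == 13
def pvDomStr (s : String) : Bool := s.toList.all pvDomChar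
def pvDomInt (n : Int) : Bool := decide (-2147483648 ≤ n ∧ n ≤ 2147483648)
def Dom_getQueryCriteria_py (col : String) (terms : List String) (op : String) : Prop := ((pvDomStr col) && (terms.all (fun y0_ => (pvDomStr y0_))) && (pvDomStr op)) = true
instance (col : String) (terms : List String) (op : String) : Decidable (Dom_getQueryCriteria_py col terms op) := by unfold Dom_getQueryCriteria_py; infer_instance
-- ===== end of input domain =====

-- B replaces A's indexed loop (with its idx==0 branch) by joining len(terms) copies of one clause string with the separator " OR"; objective: idiomatic.


-- ===== PORT A =====
-- for idx, _ in enumerate(terms): accumulate the first clause at idx == 0, the " OR " clause otherwise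
def getQueryCriteria_py (col : String) (terms : List String) (op : String) : String :=
  (PySem.List.enumerate terms).foldl
    (fun toQuery p =>
      if p.1 == 0 then
        toQuery ++ (" " ++ col ++ " " ++ op ++ " ? ")
      else
        toQuery ++ (" OR " ++ col ++ " " ++ op ++ " ? "))
    ""

-- ===== PORT B =====
-- " OR".join([clause] * len(terms)); Python's str.join is PySem.Str.join
def getQueryCriteria_py_alt (col : String) (terms : List String) (op : String) : String :=
  PySem.Str.join " OR" (List.replicate terms.length (" " ++ col ++ " " ++ op ++ " ? "))

-- ===== PRECONDITION & SPEC =====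
def Spec_getQueryCriteria_py (col : String) (terms : List String) (op : String) (out : String) : Prop := out = getQueryCriteria_py_alt col terms op
instance (col : String) (terms : List String) (op : String) (out : String) : Decidable (Spec_getQueryCriteria_py col terms op out) := by unfold Spec_getQueryCriteria_py; infer_instance

-- ===== CLAIM (what is proved, stated in full; the proofs are below) =====
def Claim_equal_getQueryCriteria_py : Prop := ∀ (col : String) (terms : List String) (op : String), Dom_getQueryCriteria_py col terms op → Spec_getQueryCriteria_py col terms op (getQueryCriteria_py col terms op)

-- ===== LEMMAS AND PROOFS =====

-- String.foldl-append over any accumulator splits off the accumulator.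
theorem foldl_append_eq (l : List String) :
    ∀ a : String, l.foldl (fun r s => r ++ s) a = a ++ l.foldl (fun r s => r ++ s) "" := by
  induction l with
  | nil => intro a; simp
  | cons b l ih =>
    intro a
    simp only [List.foldl_cons]
    rw [ih (a ++ b), ih ("" ++ b), String.append_assoc]
    simp

theorem join_cons (a : String) (l : List String) :
    String.join (a :: l) = a ++ String.join l := by
  simp only [String.join, List.foldl_cons]
  rw [foldl_append_eq]
  simp

-- " OR".join of (n+1) copies of c equals c followed by n copies of (" OR" ++ c)
theorem strJoin_nil (sep : String) : PySem.Str.join sep [] = "" := by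
  simp [PySem.Str.join]

theorem strJoin_singleton (sep a : String) : PySem.Str.join sep [a] = a := by
  simp [PySem.Str.join, PySem.Chars.join_singleton]

theorem strJoin_cons_cons (sep a b : String) (l : List String) :
    PySem.Str.join sep (a :: b :: l) = a ++ sep ++ PySem.Str.join sep (b :: l) := by
  simp [PySem.Str.join, PySem.Chars.join_cons_cons, String.append_assoc]

theorem join_replicate (sep c : String) (n : Nat) :
    PySem.Str.join sep (List.replicate (n + 1) c)
      = c ++ String.join (List.replicate n (sep ++ c)) := by
  induction n with
  | zero => simp [strJoin_singleton, String.join]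
  | succ n ih =>
    rw [List.replicate_succ, List.replicate_succ, strJoin_cons_cons, ← List.replicate_succ, ih]
    rw [List.replicate_succ, join_cons]
    simp [String.append_assoc]

-- A's loop from any positive start index appends exactly xs.length copies of the OR clause.
theorem fold_tail (col op : String) (xs : List String) :
    ∀ (s : Int) (acc : String), 1 ≤ s →
      (PySem.List.enumerate xs s).foldl
        (fun toQuery p =>
          if p.1 == 0 then
            toQuery ++ (" " ++ col ++ " " ++ op ++ " ? ")
          else
            toQuery ++ (" OR " ++ col ++ " " ++ op ++ " ? "))
        acc
      = acc ++ String.join (List.replicate xs.length (" OR " ++ col ++ " " ++ op ++ " ? ")) := by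
  induction xs with
  | nil => intro s acc _; simp [PySem.List.enumerate_nil, String.join]
  | cons x xs ih =>
    intro s acc hs
    have hne : (s == 0) = false := by simp; omega
    rw [PySem.List.enumerate_cons]
    simp only [List.foldl_cons, hne, Bool.false_eq_true, if_false]
    rw [ih (s + 1) _ (by omega)]
    simp only [List.length_cons, List.replicate_succ, join_cons]
    simp [String.append_assoc]

-- ===== VERDICT =====
theorem getQueryCriteria_py_spec : Claim_equal_getQueryCriteria_py := by
  intro col terms op _
  unfold Spec_getQueryCriteria_py getQueryCriteria_py getQueryCriteria_py_alt
  cases terms with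
  | nil => simp [PySem.List.enumerate_nil, strJoin_nil]
  | cons t ts =>
    rw [PySem.List.enumerate_cons]
    have h0 : ((0 : Int) == 0) = true := rfl
    simp only [List.foldl_cons, h0, if_true, List.length_cons,
      show (0 : Int) + 1 = 1 from by norm_num]
    rw [fold_tail col op ts 1 _ (by omega), join_replicate]
    have hc : (" OR" ++ (" " ++ col ++ " " ++ op ++ " ? "))
        = (" OR " ++ col ++ " " ++ op ++ " ? ") := by
      simp only [String.append_assoc]
      rw [← String.append_assoc]
      congr 1
    rw [← hc]
    simp [String.append_assoc]
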